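-- pv_equiv track=rewrite | github.com/VoroninAA/LPD | sheduling_algorithms.py | calculate_stats
-- ===== SOURCE A (Python) =====
-- def calculate_stats(result):
--     max_len = 0
--     sum_len = "("
--     for t in result:
--         sum_len += str(len(t)) + " + "
--     sum_len = sum_len[:-3]
--     sum_len += ")"
--     stats=[]
--     finished_threads = [False for l in result]
--
--     for l in result:
--         if len(l)>max_len:
--             max_len=len(l)
--
--     stats.append('Throughput=' + str(len(result))+ "/" + str(max_len))
--     stats.append("Turnaround time="+ sum_len + "/" + str(len(result)))
--
--
--
--     eff_loss=0;
--     count_not_busy=0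
--     count_working_threads=0
--     for i in range(0,max_len):
--         for k in range(0,len(result)):
--             if  finished_threads[k]==False:
--                 count_working_threads+=1
--                 if result[k][i]!='x':
--                     count_not_busy+=1
--
--         if count_working_threads==count_not_busy:
--             eff_loss+=1
--         count_not_busy = 0
--         count_working_threads = 0
--         for j in range(0,len(result)):
--             if i==len(result[j])-1:
--                 finished_threads[j]=True
--
--
--     stats.append("Efficiency=" + str(max_len-eff_loss) + "/" + str(max_len))
--     io_count=0
--     wait_count=0
--
--     wait_count_list = []
--     for l in result:
--         tag = False
--         tag2 = False
--         for i in range(1,len(l)):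
--             if l[i-1]=='x' and l[i]=='-':
--                 io_count+=1
--                 wait_count = 0
--                 tag2 = True
--
--             if l[i-1]=='-' and l[i]=='.':
--                 tag=True
--                 tag2=True
--                 wait_count+=1
--             if l[i-1]=='.' and l[i]=='.' and tag:
--                 wait_count+=1
--             elif tag2 and l[i]=='x':
--                 tag2 = False
--                 wait_count_list.append(wait_count)
--     wait_output = "("
--     for w in wait_count_list:
--         wait_output += str(w) + " + "
--     wait_output = wait_output[:-3]
--     wait_output += ")"
--     stats.append("Waittime=" + wait_output + "/" + str(io_count))
--     task_switches=0
--
--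
--     prev_thread=0
--     for k in range(0,len(result)):
--         if result[k][0]=='x':
--             prev_thread=k
--
--     finished_threads = [False for t in result]
--     for i in range(0,max_len):
--         for k in range(0,len(result)):
--             if  finished_threads[k]==False:
--                 if result[k][i]=='x':
--                     if prev_thread!=k:
--                         task_switches+=1
--                         prev_thread=k
--
--
--
--         for j in range(0,len(result)):
--             if i==len(result[j])-1:
--                 finished_threads[j]=True
--
--     stats.append("Task switches="+str(task_switches))
--
--
--     return stats
-- ===== SOURCE B (Python) =====
-- def _cat(c):
--     # category of a cell: only 'x', '-', '.' are meaningful, anything else behaves alike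
--     return c if c in ('x', '-', '.') else ''
--
--
-- def _runs(t):
--     # run-length encoding of the category sequence of a thread row
--     if not t:
--         return []
--     c = _cat(t[0])
--     j = 1
--     while j < len(t) and _cat(t[j]) == c:
--         j += 1
--     return [(c, j)] + _runs(t[j:])
--
--
-- def calculate_stats(result):
--     # Faster row-major algorithm: one pass over each thread row collects the busy columns
--     # (a set) and the encoded execution events; efficiency is the size of the busy
--     # set, task switches come from a single integer sort of the events, and the
--     # wait/IO machine works on run-length blocks instead of character pairs.
--     n = len(result)
--     lens = [len(t) for t in result]
--     max_len = max(lens, default=0)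
--
--     busy = set()
--     events = []
--     for k, t in enumerate(result):
--         for i, c in enumerate(t):
--             if c == 'x':
--                 busy.add(i)
--                 events.append(i * n + k)
--
--     io_count = 0
--     wait_count = 0
--     waits = []
--     for t in result:
--         tag = tag2 = False
--         prev = None
--         for c, m in _runs(t):
--             if prev == 'x' and c == '-':
--                 io_count += 1
--                 wait_count = 0
--                 tag2 = True
--             elif prev == '-' and c == '.':
--                 tag = tag2 = True
--                 wait_count += 1
--             elif c == 'x' and tag2:
--                 waits.append(wait_count)
--                 tag2 = False
--             if c == '.' and tag:
--                 wait_count += m - 1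
--             prev = c
--
--     prev_thread = 0
--     for k, t in enumerate(result):
--         if t[0] == 'x':
--             prev_thread = k
--     task_switches = 0
--     for e in sorted(events):
--         k = e % n
--         if k != prev_thread:
--             task_switches += 1
--             prev_thread = k
--
--     sum_len = ("(" + "".join(str(L) + " + " for L in lens))[:-3] + ")"
--     wait_output = ("(" + "".join(str(w) + " + " for w in waits))[:-3] + ")"
--     return ['Throughput=' + str(n) + "/" + str(max_len),
--             "Turnaround time=" + sum_len + "/" + str(n),
--             "Efficiency=" + str(len(busy)) + "/" + str(max_len),
--             "Waittime=" + wait_output + "/" + str(io_count),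
--             "Task switches=" + str(task_switches)]
-- ===== Notes on version B (the rewrite author's own statement) =====
-- stated objective: faster
-- what changed: B is row-major where A is column-major: one pass over the rows collects a busy-column set (whose size is the efficiency numerator, replacing A's per-column count_working/count_not_busy scan over finished_threads flag arrays) and a list of events encoded as column*n+thread, from which task switches are computed by a single integer sort instead of A's second flagged column scan; the wait/IO machine runs on run-length blocks of cell categories instead of A's character-pair scan, and the '( .. + .. )' strings are built with join instead of repeated concatenation.
import Mathlib
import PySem

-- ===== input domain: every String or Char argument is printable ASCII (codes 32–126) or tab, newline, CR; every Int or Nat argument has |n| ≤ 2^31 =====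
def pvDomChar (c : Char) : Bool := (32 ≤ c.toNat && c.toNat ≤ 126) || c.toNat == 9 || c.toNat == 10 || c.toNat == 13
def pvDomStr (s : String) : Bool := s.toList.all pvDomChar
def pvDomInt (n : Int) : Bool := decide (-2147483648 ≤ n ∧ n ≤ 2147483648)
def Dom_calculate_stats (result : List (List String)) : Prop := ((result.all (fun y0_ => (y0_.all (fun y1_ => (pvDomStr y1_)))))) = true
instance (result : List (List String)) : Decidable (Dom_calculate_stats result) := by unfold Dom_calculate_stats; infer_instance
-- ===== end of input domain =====

-- B recomputes the statistics row-major: a busy-column set and an encoded event list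
-- built in one pass over the rows replace A's two column scans with finished_threads
-- arrays, task switches come from sorting the events, and the wait/IO machine runs on
-- run-length blocks instead of character pairs (objective: faster, measured).

-- ===== PORT A =====
-- the `for j in range(len(result)): if i==len(result[j])-1: finished_threads[j]=True` loop
def pvA_finUpd (result : List (List String)) (i : Int) (fin : List Bool) : List Bool :=
  (PySem.List.pyRange 0 (result.length : Int) 1).foldl (fun f j =>
    if i = ((PySem.List.pyGetD result j []).length : Int) - 1 then PySem.List.pySetD f j true else f) fin

-- inner `for k in range(len(result))` counting loop of the efficiency scan
def pvA_countInner (result : List (List String)) (fin : List Bool) (i : Int) (init : Int × Int) : Int × Int :=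
  (PySem.List.pyRange 0 (result.length : Int) 1).foldl (fun (p : Int × Int) k =>
    if PySem.List.pyGetD fin k false = false then
      (p.1 + 1,
       if PySem.List.pyGetD (PySem.List.pyGetD result k []) i "" ≠ "x" then p.2 + 1 else p.2)
    else p) init

-- one column of the efficiency scan (state: finished_threads, eff_loss, count_not_busy, count_working)
def pvA_effStep (result : List (List String)) (st : List Bool × Int × Int × Int) (i : Int) :
    List Bool × Int × Int × Int :=
  let p := pvA_countInner result st.1 i (st.2.2.2, st.2.2.1)
  (pvA_finUpd result i st.1, (if p.1 = p.2 then st.2.1 + 1 else st.2.1), 0, 0)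

-- inner `for k in range(len(result))` loop of the task-switch scan
def pvA_swInner (result : List (List String)) (fin : List Bool) (i : Int) (init : Int × Int) : Int × Int :=
  (PySem.List.pyRange 0 (result.length : Int) 1).foldl (fun (p : Int × Int) k =>
    if PySem.List.pyGetD fin k false = false then
      if PySem.List.pyGetD (PySem.List.pyGetD result k []) i "" = "x" then
        if p.2 ≠ k then (p.1 + 1, k) else p
      else p
    else p) init

-- one column of the task-switch scan (state: finished_threads, task_switches, prev_thread)
def pvA_swStep (result : List (List String)) (st : List Bool × Int × Int) (i : Int) :
    List Bool × Int × Int :=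
  let p := pvA_swInner result st.1 i (st.2.1, st.2.2)
  (pvA_finUpd result i st.1, p.1, p.2)

-- the body of the wait/IO loop for the pair (l[i-1], l[i]); state (tag, tag2, io_count, wait_count, wait_count_list)
def pvA_waitCore (q : Bool × Bool × Int × Int × List Int) (prevc curc : String) :
    Bool × Bool × Int × Int × List Int :=
  let io := if prevc = "x" ∧ curc = "-" then q.2.2.1 + 1 else q.2.2.1
  let wc := if prevc = "x" ∧ curc = "-" then 0 else q.2.2.2.1
  let tag2 := if prevc = "x" ∧ curc = "-" then true else q.2.1
  let tag := if prevc = "-" ∧ curc = "." then true else q.1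
  let tag2 := if prevc = "-" ∧ curc = "." then true else tag2
  let wc := if prevc = "-" ∧ curc = "." then wc + 1 else wc
  if prevc = "." ∧ curc = "." ∧ tag = true then (tag, tag2, io, wc + 1, q.2.2.2.2)
  else if tag2 = true ∧ curc = "x" then (tag, false, io, wc, q.2.2.2.2 ++ [wc])
  else (tag, tag2, io, wc, q.2.2.2.2)

-- one thread of the wait/IO loop (io_count, wait_count, wait_count_list survive between threads)
def pvA_threadWait (st : Int × Int × List Int) (l : List String) : Int × Int × List Int :=
  let q := (PySem.List.pyRange 1 (l.length : Int) 1).foldl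
      (fun q i => pvA_waitCore q (PySem.List.pyGetD l (i - 1) "") (PySem.List.pyGetD l i ""))
      (false, false, st.1, st.2.1, st.2.2)
  (q.2.2.1, q.2.2.2.1, q.2.2.2.2)

def calculate_stats (result : List (List String)) : List String :=
  let sum_len : String := result.foldl (fun s t => s ++ (PySem.Int.toStr (t.length : Int) ++ " + ")) "("
  let sum_len : String := PySem.Str.slice sum_len none (some (-3))
  let sum_len : String := sum_len ++ ")"
  let stats : List String := []
  let finished_threads : List Bool := result.map (fun _ => false)
  let max_len : Int := result.foldl (fun m l => if (l.length : Int) > m then (l.length : Int) else m) 0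
  let stats := stats ++ ["Throughput=" ++ PySem.Int.toStr (result.length : Int) ++ "/" ++ PySem.Int.toStr max_len]
  let stats := stats ++ ["Turnaround time=" ++ sum_len ++ "/" ++ PySem.Int.toStr (result.length : Int)]
  let st1 := (PySem.List.pyRange 0 max_len 1).foldl (pvA_effStep result) (finished_threads, 0, 0, 0)
  let eff_loss : Int := st1.2.1
  let stats := stats ++ ["Efficiency=" ++ PySem.Int.toStr (max_len - eff_loss) ++ "/" ++ PySem.Int.toStr max_len]
  let w := result.foldl pvA_threadWait (0, 0, ([] : List Int))
  let io_count : Int := w.1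
  let wait_count_list : List Int := w.2.2
  let wait_output : String := wait_count_list.foldl (fun s x => s ++ (PySem.Int.toStr x ++ " + ")) "("
  let wait_output : String := PySem.Str.slice wait_output none (some (-3))
  let wait_output : String := wait_output ++ ")"
  let stats := stats ++ ["Waittime=" ++ wait_output ++ "/" ++ PySem.Int.toStr io_count]
  let prev_thread : Int := (PySem.List.pyRange 0 (result.length : Int) 1).foldl
      (fun prev k => if PySem.List.pyGetD (PySem.List.pyGetD result k []) 0 "" = "x" then k else prev) 0
  let st2 := (PySem.List.pyRange 0 max_len 1).foldl (pvA_swStep result) (result.map (fun _ => false), 0, prev_thread)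
  let stats := stats ++ ["Task switches=" ++ PySem.Int.toStr st2.2.1]
  stats

-- ===== PORT B =====
-- category of a cell: only 'x', '-', '.' are meaningful, anything else behaves alike
def pvCat (c : String) : String :=
  if c = "x" then "x" else if c = "-" then "-" else if c = "." then "." else ""

-- run-length encoding of the category sequence of a thread row (Source B's _runs)
def pvRuns : List String → List (String × Int)
  | [] => []
  | c :: cs =>
    (pvCat c, 1 + ((cs.takeWhile (fun d => pvCat d == pvCat c)).length : Int)) ::
      pvRuns (cs.dropWhile (fun d => pvCat d == pvCat c))
termination_by l => l.length
decreasing_by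
  simp only [List.length_cons]
  exact Nat.lt_succ_of_le (List.length_dropWhile_le _ _)

-- B's wait/IO machine on one run (state: prev category, (tag, tag2, io, wait, waits))
def pvRunStep (s : Option String × (Bool × Bool × Int × Int × List Int)) (r : String × Int) :
    Option String × (Bool × Bool × Int × Int × List Int) :=
  let q := s.2
  let q :=
    if s.1 = some "x" ∧ r.1 = "-" then (q.1, true, q.2.2.1 + 1, 0, q.2.2.2.2)
    else if s.1 = some "-" ∧ r.1 = "." then (true, true, q.2.2.1, q.2.2.2.1 + 1, q.2.2.2.2)
    else if r.1 = "x" ∧ q.2.1 = true then (q.1, false, q.2.2.1, q.2.2.2.1, q.2.2.2.2 ++ [q.2.2.2.1])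
    else q
  let q :=
    if r.1 = "." ∧ q.1 = true then (q.1, q.2.1, q.2.2.1, q.2.2.2.1 + (r.2 - 1), q.2.2.2.2)
    else q
  (some r.1, q)

def pvB_threadWait (st : Int × Int × List Int) (t : List String) : Int × Int × List Int :=
  ((pvRuns t).foldl pvRunStep (none, (false, false, st.1, st.2.1, st.2.2))).2.2.2

-- the row pass collecting the busy-column set and the encoded events (i*n + k)
def pvB_mark (n : Int) (st : PySem.Set Int × List Int) (kt : Int × List String) :
    PySem.Set Int × List Int :=
  (PySem.List.enumerate kt.2 0).foldl (fun be ic =>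
    (if ic.2 = "x" then PySem.Set.add be.1 ic.1 else be.1,
     if ic.2 = "x" then be.2 ++ [ic.1 * n + kt.1] else be.2)) st

def calculate_stats_alt (result : List (List String)) : List String :=
  let n : Int := (result.length : Int)
  let lens : List Int := result.map (fun t => (t.length : Int))
  let max_len : Int := (PySem.List.max? lens (fun x => x)).getD 0
  let be := (PySem.List.enumerate result 0).foldl (pvB_mark n) (PySem.Set.empty, [])
  let busy : PySem.Set Int := be.1
  let events : List Int := be.2
  let w := result.foldl pvB_threadWait (0, 0, ([] : List Int))
  let io_count : Int := w.1
  let waits : List Int := w.2.2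
  let prev0 : Int := (PySem.List.enumerate result 0).foldl
      (fun prev kt => if PySem.List.pyGetD kt.2 0 "" = "x" then kt.1 else prev) 0
  let sw := (PySem.List.sorted events (fun x => x)).foldl
      (fun (p : Int × Int) e =>
        let k := PySem.Int.mod e n
        if k ≠ p.2 then (p.1 + 1, k) else p) (0, prev0)
  let sum_len : String :=
    PySem.Str.slice ("(" ++ PySem.Str.join "" (lens.map (fun L => PySem.Int.toStr L ++ " + ")))
      none (some (-3)) ++ ")"
  let wait_output : String :=
    PySem.Str.slice ("(" ++ PySem.Str.join "" (waits.map (fun x => PySem.Int.toStr x ++ " + ")))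
      none (some (-3)) ++ ")"
  ["Throughput=" ++ PySem.Int.toStr n ++ "/" ++ PySem.Int.toStr max_len,
   "Turnaround time=" ++ sum_len ++ "/" ++ PySem.Int.toStr n,
   "Efficiency=" ++ PySem.Int.toStr (PySem.Set.len busy) ++ "/" ++ PySem.Int.toStr max_len,
   "Waittime=" ++ wait_output ++ "/" ++ PySem.Int.toStr io_count,
   "Task switches=" ++ PySem.Int.toStr sw.1]

-- ===== PRECONDITION & SPEC =====
-- Pre_ excludes inputs with an empty thread row: there both programs raise IndexError
-- (A at result[k][0]/result[k][i], B at its prev_thread seed t[0]).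
def Pre_calculate_stats (result : List (List String)) : Prop := ∀ l ∈ result, l ≠ []
instance (result : List (List String)) : Decidable (Pre_calculate_stats result) := by
  unfold Pre_calculate_stats; infer_instance
def pvWitness_calculate_stats : List (List String) := [["x", "-", "."], ["x"]]

def Spec_calculate_stats (result : List (List String)) (out : List String) : Prop :=
  out = calculate_stats_alt result
instance (result : List (List String)) (out : List String) : Decidable (Spec_calculate_stats result out) := by
  unfold Spec_calculate_stats; infer_instance

-- ===== CLAIM (what is proved, stated in full; the proofs are below) =====
def Claim_equal_calculate_stats : Prop := ∀ (result : List (List String)),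
  Dom_calculate_stats result → Pre_calculate_stats result →
  Spec_calculate_stats result (calculate_stats result)

-- ===== LEMMAS AND PROOFS =====

-- proof-layer objects: the per-column index of active 'x' threads, the pairwise
-- wait-machine step, and the task-switch step A's loops reduce to
def pvB_colf (result : List (List String)) (i : Int) : List Int :=
  ((PySem.List.enumerate result 0).filter
    (fun kt => decide (i < (kt.2.length : Int)) && decide (PySem.List.pyGetD kt.2 i "" = "x"))).map
    (fun kt => kt.1)

def pvPairStep (q : Bool × Bool × Int × Int × List Int) (pc : String × String) :
    Bool × Bool × Int × Int × List Int :=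
  if pc.2 = "-" ∧ pc.1 = "x" then (q.1, true, q.2.2.1 + 1, 0, q.2.2.2.2)
  else if pc.2 = "." ∧ (pc.1 = "-" ∨ (pc.1 = "." ∧ q.1 = true)) then
    (if pc.1 = "-" then true else q.1, if pc.1 = "-" then true else q.2.1,
     q.2.2.1, q.2.2.2.1 + 1, q.2.2.2.2)
  else if pc.2 = "x" ∧ q.2.1 = true then (q.1, false, q.2.2.1, q.2.2.2.1, q.2.2.2.2 ++ [q.2.2.2.1])
  else q

def pvB_swStep (p : Int × Int) (k : Int) : Int × Int :=
  if k ≠ p.2 then (p.1 + 1, k) else p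

-- ---------- strings ----------
theorem pv_chars_join_cons (c : List Char) (rest : List (List Char)) :
    PySem.Chars.join [] (c :: rest) = c ++ PySem.Chars.join [] rest := by
  cases rest with
  | nil => simp [PySem.Chars.join, List.intercalate]
  | cons d ds => simp [PySem.Chars.join, List.intercalate]

theorem pv_join_cons (s : String) (rest : List String) :
    PySem.Str.join "" (s :: rest) = s ++ PySem.Str.join "" rest := by
  apply String.toList_inj.mp
  simp only [PySem.Str.toList_join, String.toList_append, List.map_cons]
  have h : ("" : String).toList = [] := by decide
  rw [h, pv_chars_join_cons]

theorem pv_foldl_append_join {α : Type} (xs : List α) (f : α → String) (init : String) :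
    xs.foldl (fun s x => s ++ f x) init = init ++ PySem.Str.join "" (xs.map f) := by
  induction xs generalizing init with
  | nil =>
    have h : PySem.Str.join "" ([] : List String) = "" := by decide
    simp [h]
  | cons x t ih =>
    simp only [List.foldl_cons, List.map_cons, pv_join_cons, ih, String.append_assoc]

-- ---------- max_len ----------
theorem pv_max_eq (result : List (List String)) :
    result.foldl (fun m l => if (l.length : Int) > m then (l.length : Int) else m) 0
      = (PySem.List.max? (result.map (fun t => (t.length : Int))) (fun x => x)).getD 0 := by
  cases result with
  | nil => simp [show PySem.List.max? ([] : List Int) (fun x => x) = none from by decide]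
  | cons x t =>
    rw [List.map_cons, PySem.List.max?_id_cons, Option.getD_some, List.foldl_map]
    have hcg : ∀ (l : List (List String)) (m : Int),
        l.foldl (fun m l => if (l.length : Int) > m then (l.length : Int) else m) m
          = l.foldl (fun a x => max a ((x.length : Int))) m := by
      intro l m
      apply PySem.List.foldl_congr_mem
      intro acc x _
      by_cases h : (x.length : Int) > acc
      · simp [h, max_eq_right (le_of_lt h)]
      · simp [h, max_eq_left (not_lt.mp h)]
    rw [hcg, List.foldl_cons]
    have h0 : max 0 ((x.length : Int)) = (x.length : Int) :=
      max_eq_right (by positivity)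
    rw [h0]

-- every row length is at most max_len
theorem pv_len_le_max (result : List (List String)) (t : List String) (ht : t ∈ result) :
    (t.length : Int) ≤ (PySem.List.max? (result.map (fun t => (t.length : Int))) (fun x => x)).getD 0 := by
  cases hmx : PySem.List.max? (result.map (fun t => (t.length : Int))) (fun x => x) with
  | none =>
    rw [PySem.List.max?_eq_none_iff, List.map_eq_nil_iff] at hmx
    subst hmx; cases ht
  | some m =>
    have := PySem.List.max?_isMax hmx ((t.length : Int)) (List.mem_map_of_mem ht)
    simpa using this

theorem pv_max_nonneg (result : List (List String)) :
    0 ≤ (PySem.List.max? (result.map (fun t => (t.length : Int))) (fun x => x)).getD 0 := by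
  cases hmx : PySem.List.max? (result.map (fun t => (t.length : Int))) (fun x => x) with
  | none => simp
  | some m =>
    have hm := PySem.List.max?_mem hmx
    obtain ⟨t, _, rfl⟩ := List.mem_map.mp hm
    simp

-- ---------- indexing plumbing ----------
theorem pv_getD_res {α : Type} (xs : List α) (d : α) (m : Nat) (hm : m < xs.length) :
    PySem.List.pyGetD xs (m : Int) d = xs[m] := by
  simp [hm]

theorem pv_pyfold_enum {σ : Type} (result : List (List String)) (g : σ → Int → σ)
    (h : σ → Int × List String → σ) (init : σ)
    (hg : ∀ (s : σ) (k : Nat) (hk : k < result.length), g s (k : Int) = h s ((k : Int), result[k])) :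
    (PySem.List.pyRange 0 (result.length : Int) 1).foldl g init
      = (PySem.List.enumerate result 0).foldl h init := by
  rw [PySem.List.enumerate_eq_map_pyRange result ([] : List String), List.foldl_map]
  simp only [PySem.List.len_eq]
  apply PySem.List.foldl_congr_mem
  intro acc k hk
  rw [PySem.List.mem_pyRange_one] at hk
  obtain ⟨m, rfl⟩ := Int.eq_ofNat_of_zero_le hk.1
  have hm : m < result.length := by exact_mod_cast hk.2
  rw [hg acc m hm, pv_getD_res result [] m hm]

theorem pv_pyfold_zip {σ : Type} (l : List String) (F : σ → String → String → σ) (init : σ) :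
    (PySem.List.pyRange 1 (l.length : Int) 1).foldl
        (fun s i => F s (PySem.List.pyGetD l (i - 1) "") (PySem.List.pyGetD l i "")) init
      = (l.zip l.tail).foldl (fun s pc => F s pc.1 pc.2) init := by
  rcases l with _ | ⟨c, cs⟩
  · simp [PySem.List.pyRange_one_eq_nil]
  · set l := c :: cs with hl
    have hlen : l.length = cs.length + 1 := by simp [hl]
    have hzlen : (l.zip l.tail).length = cs.length := by
      simp [hl]
    rw [show (l.zip l.tail).foldl (fun s pc => F s pc.1 pc.2) init
        = (PySem.List.pyRange 0 ((l.zip l.tail).length : Int) 1).foldl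
            (fun acc j => F acc (PySem.List.pyGetD (l.zip l.tail) j ("", "")).1
              (PySem.List.pyGetD (l.zip l.tail) j ("", "")).2) init from
      (PySem.List.foldl_pyRange_zero_pyGetD' (l.zip l.tail) ("", "")
        (fun s pc => F s pc.1 pc.2) init).symm]
    have hshift : PySem.List.pyRange 1 (l.length : Int) 1
        = (PySem.List.pyRange 0 ((l.zip l.tail).length : Int) 1).map (fun x => x + 1) := by
      rw [PySem.List.pyRange_one, PySem.List.pyRange_one]
      have h1 : ((l.length : Int) - 1).toNat = cs.length := by
        rw [hlen]; push_cast; omega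
      have h2 : (((l.zip l.tail).length : Int) - 0).toNat = cs.length := by
        rw [hzlen]; push_cast; omega
      rw [h1, h2, List.map_map]
      apply List.map_congr_left
      intro k _
      simp [Function.comp]
      ring
    rw [hshift, List.foldl_map]
    apply PySem.List.foldl_congr_mem
    intro acc j hj
    rw [PySem.List.mem_pyRange_one] at hj
    obtain ⟨m, rfl⟩ := Int.eq_ofNat_of_zero_le hj.1
    have hm : m < (l.zip l.tail).length := by exact_mod_cast hj.2
    have hm' : m < l.length := by rw [hlen]; rw [hzlen] at hm; omega
    have hm'' : m + 1 < l.length := by rw [hlen]; rw [hzlen] at hm; omega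
    have e1 : ((m : Int) + 1 - 1) = (m : Int) := by ring
    have e2 : ((m : Int) + 1) = ((m + 1 : Nat) : Int) := by push_cast; ring
    rw [e1, e2, pv_getD_res l "" m hm', pv_getD_res l "" (m + 1) hm'',
      pv_getD_res (l.zip l.tail) ("", "") m hm]
    have hz : (l.zip l.tail)[m] = (l[m], l[m + 1]) := by
      simp [List.getElem_zip, List.getElem_tail]
    rw [hz]

-- ---------- finished_threads update ----------
theorem pv_finUpd_aux (result : List (List String)) (i : Int) (fin : List Bool)
    (hlen : fin.length = result.length) (m : Nat) (hm : m ≤ result.length) :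
    (((PySem.List.pyRange 0 (m : Int) 1).foldl (fun f j =>
        if i = ((PySem.List.pyGetD result j []).length : Int) - 1
        then PySem.List.pySetD f j true else f) fin).length = fin.length) ∧
    (∀ (k : Nat) (hk : k < result.length),
      PySem.List.pyGetD ((PySem.List.pyRange 0 (m : Int) 1).foldl (fun f j =>
        if i = ((PySem.List.pyGetD result j []).length : Int) - 1
        then PySem.List.pySetD f j true else f) fin) (k : Int) false
      = if k < m ∧ i = ((result[k]'(by omega)).length : Int) - 1 then true
        else PySem.List.pyGetD fin (k : Int) false) := by
  induction m with
  | zero =>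
    rw [show ((0 : Nat) : Int) = 0 from rfl, PySem.List.pyRange_one_eq_nil (le_refl 0)]
    simp
  | succ m ih =>
    have hm' : m ≤ result.length := by omega
    obtain ⟨ihl, ihg⟩ := ih hm'
    have hcast : ((m + 1 : Nat) : Int) = (m : Int) + 1 := by push_cast; ring
    rw [hcast, PySem.List.pyRange_one_succ_right (by positivity : (0 : Int) ≤ (m : Int)), List.foldl_append]
    simp only [List.foldl_cons, List.foldl_nil]
    have hres : PySem.List.pyGetD result (m : Int) [] = result[m]'(by omega) :=
      pv_getD_res result [] m (by omega)
    by_cases hc : i = (((result[m]'(by omega)).length : Int)) - 1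
    · rw [hres, if_pos hc]
      constructor
      · rw [PySem.List.length_pySetD, ihl]
      · intro k hk
        have hmf : m < ((PySem.List.pyRange 0 (m : Int) 1).foldl (fun f j =>
            if i = ((PySem.List.pyGetD result j []).length : Int) - 1
            then PySem.List.pySetD f j true else f) fin).length := by
          rw [ihl, hlen]; omega
        rw [PySem.List.pyGetD_pySetD_natCast _ m k true false hmf, ihg k hk]
        by_cases hkm : k = m
        · subst hkm
          simp [hc]
        · have : (k < m + 1 ∧ i = (((result[k]'(by omega)).length : Int)) - 1)
              ↔ (k < m ∧ i = (((result[k]'(by omega)).length : Int)) - 1) := by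
            constructor
            · rintro ⟨h1, h2⟩; exact ⟨by omega, h2⟩
            · rintro ⟨h1, h2⟩; exact ⟨by omega, h2⟩
          rw [if_neg hkm, if_congr this rfl rfl]
    · rw [hres, if_neg hc]
      refine ⟨ihl, ?_⟩
      intro k hk
      rw [ihg k hk]
      by_cases hkm : k = m
      · subst hkm
        have h1 : ¬ (k < k ∧ i = (((result[k]'(by omega)).length : Int)) - 1) := by
          rintro ⟨h, _⟩; omega
        have h2 : ¬ (k < k + 1 ∧ i = (((result[k]'(by omega)).length : Int)) - 1) := by
          rintro ⟨_, h⟩; exact hc h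
        rw [if_neg h1, if_neg h2]
      · have : (k < m + 1 ∧ i = (((result[k]'(by omega)).length : Int)) - 1)
            ↔ (k < m ∧ i = (((result[k]'(by omega)).length : Int)) - 1) := by
          constructor
          · rintro ⟨h1, h2⟩; exact ⟨by omega, h2⟩
          · rintro ⟨h1, h2⟩; exact ⟨by omega, h2⟩
        rw [if_congr this rfl rfl]

theorem pv_finUpd_length (result : List (List String)) (i : Int) (fin : List Bool)
    (hlen : fin.length = result.length) :
    (pvA_finUpd result i fin).length = fin.length :=
  (pv_finUpd_aux result i fin hlen result.length (le_refl _)).1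

theorem pv_finUpd_getD (result : List (List String)) (i : Int) (fin : List Bool)
    (hlen : fin.length = result.length) (k : Nat) (hk : k < result.length) :
    PySem.List.pyGetD (pvA_finUpd result i fin) (k : Int) false
      = if i = (((result[k]).length : Int)) - 1 then true
        else PySem.List.pyGetD fin (k : Int) false := by
  have h := (pv_finUpd_aux result i fin hlen result.length (le_refl _)).2 k hk
  unfold pvA_finUpd
  rw [h]
  have hiff : (k < result.length ∧ i = (((result[k]).length : Int)) - 1)
      ↔ (i = (((result[k]).length : Int)) - 1) := ⟨fun h => h.2, fun h2 => ⟨hk, h2⟩⟩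
  rw [if_congr hiff rfl rfl]

-- transfer of the flag invariant from column i to column i+1
theorem pv_hfin_succ (result : List (List String)) (i : Int) (fin : List Bool)
    (hlen : fin.length = result.length)
    (hfin : ∀ (k : Nat) (hk : k < result.length),
      PySem.List.pyGetD fin (k : Int) false = decide (((result[k]).length : Int) ≤ i)) :
    ∀ (k : Nat) (hk : k < result.length),
      PySem.List.pyGetD (pvA_finUpd result i fin) (k : Int) false
        = decide (((result[k]).length : Int) ≤ i + 1) := by
  intro k hk
  rw [pv_finUpd_getD result i fin hlen k hk, hfin k hk]
  by_cases hc : i = (((result[k]).length : Int)) - 1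
  · rw [if_pos hc]
    have : ((result[k]).length : Int) ≤ i + 1 := by omega
    simp [this]
  · rw [if_neg hc]
    by_cases hle : ((result[k]).length : Int) ≤ i
    · have : ((result[k]).length : Int) ≤ i + 1 := by omega
      simp [hle, this]
    · have : ¬ ((result[k]).length : Int) ≤ i + 1 := by omega
      simp [hle, this]

-- the all-false initial flags satisfy the invariant at column 0 (needs nonempty threads)
theorem pv_hfin_zero (result : List (List String)) (hPre : ∀ l ∈ result, l ≠ []) :
    ∀ (k : Nat) (hk : k < result.length),
      PySem.List.pyGetD (result.map (fun _ => false)) (k : Int) false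
        = decide (((result[k]).length : Int) ≤ (0 : Int)) := by
  intro k hk
  have h1 : PySem.List.pyGetD (result.map (fun _ => false)) (k : Int) false = false := by
    have := PySem.List.pyGetD_map (fun _ => false) result (k : Int) []
    simpa using this
  have h2 : result[k] ≠ [] := hPre _ (List.getElem_mem hk)
  have h3 : 0 < (result[k]).length := List.length_pos_iff.mpr h2
  have h4 : ¬ (((result[k]).length : Int) ≤ (0 : Int)) := by omega
  rw [h1]
  symm
  rw [decide_eq_false_iff_not]
  exact h4

-- ---------- the efficiency scan ----------
theorem pv_countfold (l : List (List String)) (i : Int) (a b : Int) :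
    l.foldl (fun (p : Int × Int) t =>
      if ¬ ((t.length : Int) ≤ i) then
        (p.1 + 1, if PySem.List.pyGetD t i "" ≠ "x" then p.2 + 1 else p.2)
      else p) (a, b)
    = (a + (l.countP (fun t => !decide ((t.length : Int) ≤ i)) : Int),
       b + (l.countP (fun t => !decide ((t.length : Int) ≤ i)
              && !decide (PySem.List.pyGetD t i "" = "x")) : Int)) := by
  induction l generalizing a b with
  | nil => simp
  | cons t ts ih =>
    by_cases h1 : (t.length : Int) ≤ i
    · simp only [List.foldl_cons, if_neg (not_not_intro h1), List.countP_cons]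
      rw [ih]
      simp [h1]
    · by_cases h2 : PySem.List.pyGetD t i "" = "x"
      · simp only [List.foldl_cons, if_pos h1, if_neg (not_not_intro h2)]
        rw [ih]
        simp [List.countP_cons, h1, h2, Prod.mk.injEq]
        all_goals omega
      · simp only [List.foldl_cons, if_pos h1, if_pos h2]
        rw [ih]
        simp [List.countP_cons, h1, h2, Prod.mk.injEq]
        all_goals omega

theorem pv_count_split {α : Type} (l : List α) (p q : α → Bool) :
    l.countP p = l.countP (fun x => p x && q x) + l.countP (fun x => p x && !q x) := by
  induction l with
  | nil => simp
  | cons x t ih =>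
    simp only [List.countP_cons, ih]
    by_cases hp : p x <;> by_cases hq : q x <;> simp [hp, hq] <;> omega

theorem pv_colf_empty_iff (result : List (List String)) (i : Int) :
    (pvB_colf result i).isEmpty = true
      ↔ result.countP (fun t => !decide ((t.length : Int) ≤ i)
            && decide (PySem.List.pyGetD t i "" = "x")) = 0 := by
  rw [List.isEmpty_iff, pvB_colf, List.map_eq_nil_iff, List.filter_eq_nil_iff,
    List.countP_eq_zero]
  constructor
  · intro h t ht
    obtain ⟨k, hk, rfl⟩ := List.mem_iff_getElem.mp ht
    have hmem : ((0 : Int) + (k : Int), result[k]) ∈ PySem.List.enumerate result 0 :=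
      (PySem.List.mem_enumerate_iff result 0 _).mpr ⟨k, hk, rfl⟩
    have h2 := h _ hmem
    simp only [Bool.and_eq_true, decide_eq_true_eq, not_and, Bool.not_eq_true',
      decide_eq_false_iff_not] at h2 ⊢
    intro hlen hx
    exact h2 (by omega) hx
  · intro h kt hkt
    obtain ⟨k, hk, rfl⟩ := (PySem.List.mem_enumerate_iff result 0 kt).mp hkt
    have h2 := h _ (List.getElem_mem hk)
    simp only [Bool.and_eq_true, decide_eq_true_eq, not_and, Bool.not_eq_true',
      decide_eq_false_iff_not] at h2 ⊢
    intro hlt hx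
    exact h2 (by omega) hx

theorem pv_countInner_eq (result : List (List String)) (fin : List Bool) (i : Int)
    (hfin : ∀ (k : Nat) (hk : k < result.length),
      PySem.List.pyGetD fin (k : Int) false = decide (((result[k]).length : Int) ≤ i)) :
    pvA_countInner result fin i (0, 0)
      = ((result.countP (fun t => !decide ((t.length : Int) ≤ i)) : Int),
         (result.countP (fun t => !decide ((t.length : Int) ≤ i)
            && !decide (PySem.List.pyGetD t i "" = "x")) : Int)) := by
  unfold pvA_countInner
  have hbody : (PySem.List.pyRange 0 (result.length : Int) 1).foldl (fun (p : Int × Int) k =>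
      if PySem.List.pyGetD fin k false = false then
        (p.1 + 1,
         if PySem.List.pyGetD (PySem.List.pyGetD result k []) i "" ≠ "x" then p.2 + 1 else p.2)
      else p) ((0 : Int), (0 : Int))
    = (PySem.List.pyRange 0 (result.length : Int) 1).foldl (fun (p : Int × Int) k =>
        (fun (p : Int × Int) (t : List String) =>
          if ¬ ((t.length : Int) ≤ i) then
            (p.1 + 1, if PySem.List.pyGetD t i "" ≠ "x" then p.2 + 1 else p.2)
          else p) p (PySem.List.pyGetD result k [])) ((0 : Int), (0 : Int)) := by
    apply PySem.List.foldl_congr_mem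
    intro acc k hk
    rw [PySem.List.mem_pyRange_one] at hk
    obtain ⟨m, rfl⟩ := Int.eq_ofNat_of_zero_le hk.1
    have hm : m < result.length := by exact_mod_cast hk.2
    rw [pv_getD_res result [] m hm, hfin m hm]
    by_cases h1 : ((result[m]).length : Int) ≤ i <;> simp [h1]
  rw [hbody, PySem.List.foldl_pyRange_zero_pyGetD' result []
    (fun (p : Int × Int) (t : List String) =>
      if ¬ ((t.length : Int) ≤ i) then
        (p.1 + 1, if PySem.List.pyGetD t i "" ≠ "x" then p.2 + 1 else p.2)
      else p) ((0 : Int), (0 : Int)), pv_countfold]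
  simp

theorem pv_eff_test (result : List (List String)) (i : Int) :
    ((result.countP (fun t => !decide ((t.length : Int) ≤ i)) : Int)
      = (result.countP (fun t => !decide ((t.length : Int) ≤ i)
            && !decide (PySem.List.pyGetD t i "" = "x")) : Int))
    ↔ (pvB_colf result i).isEmpty = true := by
  rw [pv_colf_empty_iff]
  have h := pv_count_split result (fun t => !decide ((t.length : Int) ≤ i))
    (fun t => decide (PySem.List.pyGetD t i "" = "x"))
  constructor
  · intro he
    have he' : result.countP (fun t => !decide ((t.length : Int) ≤ i))
        = result.countP (fun t => !decide ((t.length : Int) ≤ i)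
            && !decide (PySem.List.pyGetD t i "" = "x")) := by exact_mod_cast he
    omega
  · intro hz
    have : result.countP (fun t => !decide ((t.length : Int) ≤ i))
        = result.countP (fun t => !decide ((t.length : Int) ≤ i)
            && !decide (PySem.List.pyGetD t i "" = "x")) := by omega
    exact_mod_cast this

theorem pv_eff_loop (result : List (List String)) (M : Int) :
    ∀ (c : Nat) (i : Int), (M - i).toNat = c → ∀ (fin : List Bool) (eff : Int),
    fin.length = result.length →
    (∀ (k : Nat) (hk : k < result.length),
        PySem.List.pyGetD fin (k : Int) false = decide (((result[k]).length : Int) ≤ i)) →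
    ((PySem.List.pyRange i M 1).foldl (pvA_effStep result) (fin, eff, 0, 0)).2.1
    = eff + ((((PySem.List.pyRange i M 1).map (pvB_colf result)).countP
        (fun c => c.isEmpty) : Nat) : Int) := by
  intro c
  induction c with
  | zero =>
    intro i hc fin eff hlen hfin
    rw [PySem.List.pyRange_one_eq_nil (by omega)]
    simp
  | succ c ih =>
    intro i hc fin eff hlen hfin
    rw [PySem.List.pyRange_one_cons (by omega)]
    simp only [List.foldl_cons, List.map_cons, List.countP_cons]
    have hstep : pvA_effStep result (fin, eff, 0, 0) i
        = (pvA_finUpd result i fin,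
           (if (pvB_colf result i).isEmpty then eff + 1 else eff), 0, 0) := by
      unfold pvA_effStep
      simp only
      rw [pv_countInner_eq result fin i hfin]
      congr 1
      congr 1
      by_cases he : (pvB_colf result i).isEmpty
      · rw [if_pos ((pv_eff_test result i).mpr he), if_pos he]
      · rw [if_neg (fun hcc => he ((pv_eff_test result i).mp hcc)), if_neg he]
    rw [hstep, ih (i + 1) (by omega) _ _
      (by rw [pv_finUpd_length result i fin hlen, hlen])
      (pv_hfin_succ result i fin hlen hfin)]
    by_cases he : (pvB_colf result i).isEmpty <;> simp [he] <;> push_cast <;> ring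

-- ---------- the task-switch scan ----------
theorem pv_swInner_eq (result : List (List String)) (fin : List Bool) (i : Int)
    (hfin : ∀ (k : Nat) (hk : k < result.length),
      PySem.List.pyGetD fin (k : Int) false = decide (((result[k]).length : Int) ≤ i))
    (ts prev : Int) :
    pvA_swInner result fin i (ts, prev) = (pvB_colf result i).foldl pvB_swStep (ts, prev) := by
  unfold pvA_swInner
  rw [pv_pyfold_enum result _
    (fun (p : Int × Int) (kt : Int × List String) =>
      if (i < (kt.2.length : Int) ∧ PySem.List.pyGetD kt.2 i "" = "x") then
        (if p.2 ≠ kt.1 then (p.1 + 1, kt.1) else p)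
      else p) (ts, prev)
    (by
      intro p k hk
      rw [pv_getD_res result [] k hk, hfin k hk]
      by_cases h1 : ((result[k]).length : Int) ≤ i
      · have : ¬ (i < ((result[k]).length : Int) ∧
            PySem.List.pyGetD (result[k]) i "" = "x") := by
          rintro ⟨h, _⟩; omega
        simp [h1, this]
      · by_cases h2 : PySem.List.pyGetD (result[k]) i "" = "x"
        · have : (i < ((result[k]).length : Int) ∧
              PySem.List.pyGetD (result[k]) i "" = "x") := ⟨by omega, h2⟩
          simp [h1, h2, this]
        · have : ¬ (i < ((result[k]).length : Int) ∧
              PySem.List.pyGetD (result[k]) i "" = "x") := by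
            rintro ⟨_, h⟩; exact h2 h
          simp [h1, h2, this])]
  rw [PySem.List.foldl_ite_eq_foldl_filter
    (fun (kt : Int × List String) =>
      i < (kt.2.length : Int) ∧ PySem.List.pyGetD kt.2 i "" = "x")
    (fun (p : Int × Int) (kt : Int × List String) =>
      if p.2 ≠ kt.1 then (p.1 + 1, kt.1) else p)]
  have hfil : (PySem.List.enumerate result 0).filter
        (fun kt => decide (i < (kt.2.length : Int) ∧ PySem.List.pyGetD kt.2 i "" = "x"))
      = (PySem.List.enumerate result 0).filter
        (fun kt => decide (i < (kt.2.length : Int)) && decide (PySem.List.pyGetD kt.2 i "" = "x")) := by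
    apply List.filter_congr
    intro kt _
    simp
  rw [hfil, pvB_colf, List.foldl_map]
  apply PySem.List.foldl_congr_mem
  intro p kt _
  unfold pvB_swStep
  by_cases h : p.2 = kt.1
  · rw [if_neg (not_not_intro h), if_neg (by simp [h])]
  · rw [if_pos h, if_pos (fun hc => (h hc.symm).elim)]

theorem pv_sw_loop (result : List (List String)) (M : Int) :
    ∀ (c : Nat) (i : Int), (M - i).toNat = c → ∀ (fin : List Bool) (ts prev : Int),
    fin.length = result.length →
    (∀ (k : Nat) (hk : k < result.length),
        PySem.List.pyGetD fin (k : Int) false = decide (((result[k]).length : Int) ≤ i)) →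
    ((PySem.List.pyRange i M 1).foldl (pvA_swStep result) (fin, ts, prev)).2
    = ((PySem.List.pyRange i M 1).map (pvB_colf result)).foldl
        (fun (p : Int × Int) c => c.foldl pvB_swStep p) (ts, prev) := by
  intro c
  induction c with
  | zero =>
    intro i hc fin ts prev hlen hfin
    rw [PySem.List.pyRange_one_eq_nil (by omega)]
    simp
  | succ c ih =>
    intro i hc fin ts prev hlen hfin
    rw [PySem.List.pyRange_one_cons (by omega)]
    simp only [List.foldl_cons, List.map_cons]
    have hstep : pvA_swStep result (fin, ts, prev) i
        = (pvA_finUpd result i fin,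
           ((pvB_colf result i).foldl pvB_swStep (ts, prev)).1,
           ((pvB_colf result i).foldl pvB_swStep (ts, prev)).2) := by
      unfold pvA_swStep
      simp only
      rw [pv_swInner_eq result fin i hfin ts prev]
    rw [hstep, ih (i + 1) (by omega) _ _ _
      (by rw [pv_finUpd_length result i fin hlen, hlen])
      (pv_hfin_succ result i fin hlen hfin)]

-- ---------- prev_thread seed ----------
theorem pv_seed_eq (result : List (List String)) :
    (PySem.List.pyRange 0 (result.length : Int) 1).foldl
      (fun prev k => if PySem.List.pyGetD (PySem.List.pyGetD result k []) 0 "" = "x" then k else prev) 0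
    = (PySem.List.enumerate result 0).foldl
      (fun prev kt => if PySem.List.pyGetD kt.2 0 "" = "x" then kt.1 else prev) 0 := by
  apply pv_pyfold_enum
  intro prev k hk
  rw [pv_getD_res result [] k hk]

-- ---------- wait/IO machine: A's pair machine ----------
theorem pv_waitCore_eq (q : Bool × Bool × Int × Int × List Int) (a b : String) :
    pvA_waitCore q a b = pvPairStep q (a, b) := by
  obtain ⟨t1, t2, io, wc, wl⟩ := q
  unfold pvA_waitCore pvPairStep
  by_cases h1 : a = "x" <;> by_cases h2 : a = "-" <;> by_cases h3 : a = "." <;>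
    by_cases h4 : b = "-" <;> by_cases h5 : b = "." <;> by_cases h6 : b = "x" <;>
    by_cases h7 : t1 = true <;> by_cases h8 : t2 = true <;>
    try simp_all

-- ---------- wait/IO machine: the char machine bridging pairs and runs ----------
def pvCharFold : Option String × (Bool × Bool × Int × Int × List Int) → List String →
    Option String × (Bool × Bool × Int × Int × List Int)
  | s, [] => s
  | (none, q), c :: cs => pvCharFold (some c, q) cs
  | (some p, q), c :: cs => pvCharFold (some c, pvPairStep q (p, c)) cs

-- the boundary part of B's run step, and its internal part
def pvBoundQ (p : Option String) (c : String) (q : Bool × Bool × Int × Int × List Int) :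
    Bool × Bool × Int × Int × List Int :=
  if p = some "x" ∧ pvCat c = "-" then (q.1, true, q.2.2.1 + 1, 0, q.2.2.2.2)
  else if p = some "-" ∧ pvCat c = "." then (true, true, q.2.2.1, q.2.2.2.1 + 1, q.2.2.2.2)
  else if pvCat c = "x" ∧ q.2.1 = true then (q.1, false, q.2.2.1, q.2.2.2.1, q.2.2.2.2 ++ [q.2.2.2.1])
  else q

def pvInternQ (γ : String) (m : Int) (q : Bool × Bool × Int × Int × List Int) :
    Bool × Bool × Int × Int × List Int :=
  if γ = "." ∧ q.1 = true then (q.1, q.2.1, q.2.2.1, q.2.2.2.1 + m, q.2.2.2.2) else q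

theorem pv_zip_charFold (cs : List String) : ∀ (c : String) (q : Bool × Bool × Int × Int × List Int),
    ((c :: cs).zip cs).foldl pvPairStep q = (pvCharFold (some c, q) cs).2 := by
  induction cs with
  | nil => intro c q; simp [pvCharFold]
  | cons d ds ih =>
    intro c q
    simp only [List.zip_cons_cons, List.foldl_cons, pvCharFold]
    exact ih d (pvPairStep q (c, d))

theorem pv_pairs_charFold (l : List String) (q : Bool × Bool × Int × Int × List Int) :
    (l.zip l.tail).foldl pvPairStep q = (pvCharFold (none, q) l).2 := by
  cases l with
  | nil => simp [pvCharFold]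
  | cons c cs => simpa [pvCharFold] using pv_zip_charFold cs c q

-- the step depends on the previous cell only through its category
theorem pv_pairStep_cat_left (q : Bool × Bool × Int × Int × List Int) (p c : String) :
    pvPairStep q (p, c) = pvPairStep q (pvCat p, c) := by
  unfold pvPairStep pvCat
  by_cases h1 : p = "x" <;> by_cases h2 : p = "-" <;> by_cases h3 : p = "." <;>
    simp_all

theorem pv_charFold_cat_left (l : List String) : ∀ (p : String) (q : Bool × Bool × Int × Int × List Int),
    (pvCharFold (some p, q) l).2 = (pvCharFold (some (pvCat p), q) l).2 := by
  induction l with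
  | nil => intro p q; simp [pvCharFold]
  | cons c cs _ =>
    intro p q
    simp only [pvCharFold]
    rw [pv_pairStep_cat_left]

theorem pv_cat_idem (c : String) : pvCat (pvCat c) = pvCat c := by
  unfold pvCat
  by_cases h1 : c = "x" <;> by_cases h2 : c = "-" <;> by_cases h3 : c = "." <;> simp_all

-- at a run boundary the pair step is B's boundary step
theorem pv_bound_eq (q : Bool × Bool × Int × Int × List Int) (s c : String)
    (hsc : ¬(s = "." ∧ c = ".")) :
    pvPairStep q (s, c) = pvBoundQ (some s) c q := by
  unfold pvPairStep pvBoundQ pvCat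
  by_cases h1 : s = "x" <;> by_cases h2 : s = "-" <;> by_cases h3 : s = "." <;>
    by_cases h4 : c = "x" <;> by_cases h5 : c = "-" <;> by_cases h6 : c = "." <;>
    simp_all

theorem pv_bound_none (c : String) (q : Bool × Bool × Int × Int × List Int)
    (hq : q.2.1 = false) : pvBoundQ none c q = q := by
  unfold pvBoundQ
  simp [hq]

theorem pv_bound_tag2_x (p : Option String) (c : String) (q : Bool × Bool × Int × Int × List Int)
    (hc : pvCat c = "x") : (pvBoundQ p c q).2.1 = false := by
  unfold pvBoundQ
  rw [hc]
  by_cases h1 : p = some "x" <;> by_cases h3 : q.2.1 = true <;> simp_all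

-- same-category internal pairs: the closed form B's run step uses
theorem pv_int_step (γ : String) (q : Bool × Bool × Int × Int × List Int)
    (p c : String) (hp : pvCat p = γ) (hc : pvCat c = γ)
    (hx : γ = "x" → q.2.1 = false) :
    pvPairStep q (p, c) = pvInternQ γ 1 q := by
  subst hp
  unfold pvPairStep pvInternQ
  unfold pvCat at hc ⊢
  unfold pvCat at hx
  by_cases h1 : p = "x" <;> by_cases h2 : p = "-" <;> by_cases h3 : p = "." <;>
    by_cases h4 : c = "x" <;> by_cases h5 : c = "-" <;> by_cases h6 : c = "." <;>
    by_cases h7 : q.1 = true <;>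
    simp_all

theorem pv_internQ_comp (γ : String) (m : Int) (q : Bool × Bool × Int × Int × List Int) :
    pvInternQ γ m (pvInternQ γ 1 q) = pvInternQ γ (m + 1) q := by
  unfold pvInternQ
  by_cases h : γ = "." ∧ q.1 = true
  · simp only [if_pos h, Prod.mk.injEq, true_and, and_true]
    omega
  · simp [h]

theorem pv_internQ_tag2 (γ : String) (m : Int) (q : Bool × Bool × Int × Int × List Int) :
    (pvInternQ γ m q).2.1 = q.2.1 := by
  unfold pvInternQ
  by_cases ht : γ = "." ∧ q.1 = true <;> simp [ht]

theorem pv_int_run (run : List String) : ∀ (γ prev : String) (q : Bool × Bool × Int × Int × List Int)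
    (rest : List String),
    (∀ d ∈ run, pvCat d = γ) → pvCat prev = γ → (γ = "x" → q.2.1 = false) →
    ∃ prev', pvCat prev' = γ ∧
      pvCharFold (some prev, q) (run ++ rest)
        = pvCharFold (some prev', pvInternQ γ (run.length : Int) q) rest := by
  induction run with
  | nil =>
    intro γ prev q rest _ hprev _
    refine ⟨prev, hprev, ?_⟩
    simp only [List.nil_append, List.length_nil, Nat.cast_zero]
    rw [show pvInternQ γ 0 q = q from by unfold pvInternQ; split_ifs <;> simp]
  | cons d ds ih =>
    intro γ prev q rest hall hprev hx
    have hd : pvCat d = γ := hall d (List.mem_cons_self)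
    have hds : ∀ e ∈ ds, pvCat e = γ := fun e he => hall e (List.mem_cons_of_mem _ he)
    simp only [List.cons_append, pvCharFold]
    rw [pv_int_step γ q prev d hprev hd hx]
    have hx1 : γ = "x" → (pvInternQ γ 1 q).2.1 = false := by
      intro hγ; rw [pv_internQ_tag2]; exact hx hγ
    obtain ⟨prev', hprev', heq⟩ := ih γ d (pvInternQ γ 1 q) rest hds hd hx1
    refine ⟨prev', hprev', ?_⟩
    rw [heq, pv_internQ_comp]
    have hlen : ((ds.length : Int) + 1) = ((d :: ds).length : Int) := by
      simp
    rw [hlen]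

-- B's run step is boundary followed by the internal closed form
theorem pv_runStep_eq (p : Option String) (c : String) (L : Int)
    (q : Bool × Bool × Int × Int × List Int) :
    pvRunStep (p, q) (pvCat c, 1 + L) = (some (pvCat c), pvInternQ (pvCat c) L (pvBoundQ p c q)) := by
  unfold pvRunStep pvBoundQ pvInternQ
  have harith : 1 + L - 1 = L := by ring
  simp only [harith]

-- B's run machine computes the pair machine
theorem pv_runs_main (l : List String) : ∀ (p : Option String) (q : Bool × Bool × Int × Int × List Int),
    (p = none → q.2.1 = false) →
    (∀ s c' cs', p = some s → l = c' :: cs' → pvCat s ≠ pvCat c') →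
    ((pvRuns l).foldl pvRunStep (p, q)).2 = (pvCharFold (p, q) l).2 := by
  induction l using pvRuns.induct with
  | case1 =>
    intro p q _ _
    cases p <;> simp [pvRuns, pvCharFold]
  | case2 c cs ih =>
    intro p q hp hp2
    rw [pvRuns]
    simp only [List.foldl_cons]
    rw [pv_runStep_eq]
    -- charFold side: the first character is the boundary step
    have hsplit : cs = cs.takeWhile (fun d => pvCat d == pvCat c)
        ++ cs.dropWhile (fun d => pvCat d == pvCat c) := (List.takeWhile_append_dropWhile).symm
    have hrun : ∀ d ∈ cs.takeWhile (fun d => pvCat d == pvCat c), pvCat d = pvCat c := by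
      intro d hd
      have := List.mem_takeWhile_imp hd
      simpa using this
    have hxB : pvCat c = "x" → (pvBoundQ p c q).2.1 = false :=
      fun hc => pv_bound_tag2_x p c q hc
    have hchar1 : (pvCharFold (p, q) (c :: cs)).2
        = (pvCharFold (some c, pvBoundQ p c q) cs).2 := by
      cases p with
      | none =>
        simp only [pvCharFold]
        rw [pv_bound_none c q (hp rfl)]
      | some s =>
        simp only [pvCharFold]
        rw [pv_bound_eq q s c (fun h => hp2 s c cs rfl rfl (by rw [h.1, h.2]))]
    rw [hchar1]
    conv_rhs => rw [hsplit]
    obtain ⟨prev', hprev', heq⟩ := pv_int_run (cs.takeWhile (fun d => pvCat d == pvCat c))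
      (pvCat c) c (pvBoundQ p c q) (cs.dropWhile (fun d => pvCat d == pvCat c))
      hrun rfl hxB
    rw [heq, pv_charFold_cat_left, hprev']
    apply ih
    · intro h; cases h
    · intro s c' cs' hs hrest
      cases hs
      intro hcon
      have hne : ¬ ((fun d => pvCat d == pvCat c) c') = true := by
        have hnil : cs.dropWhile (fun d => pvCat d == pvCat c) ≠ [] := by simp [hrest]
        have := List.head_dropWhile_not (fun d => pvCat d == pvCat c) hnil
        simpa [hrest] using this
      apply hne
      simp only [beq_iff_eq]
      rw [← hcon, pv_cat_idem]

-- per thread: A's pair machine equals B's run machine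
theorem pv_thread_eq (st : Int × Int × List Int) (l : List String) :
    pvA_threadWait st l = pvB_threadWait st l := by
  unfold pvA_threadWait pvB_threadWait
  rw [pv_pyfold_zip l (fun q a b => pvA_waitCore q a b) (false, false, st.1, st.2.1, st.2.2)]
  have hcg : (l.zip l.tail).foldl (fun s pc => pvA_waitCore s pc.1 pc.2)
        (false, false, st.1, st.2.1, st.2.2)
      = (l.zip l.tail).foldl pvPairStep (false, false, st.1, st.2.1, st.2.2) := by
    apply PySem.List.foldl_congr_mem
    intro acc pc _
    rw [pv_waitCore_eq acc pc.1 pc.2]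
  rw [hcg, pv_pairs_charFold,
    ← pv_runs_main l none (false, false, st.1, st.2.1, st.2.2) (fun _ => rfl)
      (fun s _ _ h _ => by cases h)]

theorem pv_wait_eq (result : List (List String)) :
    result.foldl pvA_threadWait (0, 0, ([] : List Int))
      = result.foldl pvB_threadWait (0, 0, ([] : List Int)) := by
  apply PySem.List.foldl_congr_mem
  intro acc l _
  exact pv_thread_eq acc l

-- ---------- the row pass: busy set and encoded events ----------
def pvRowXs (result : List (List String)) : List Int :=
  (PySem.List.enumerate result 0).flatMap (fun kt =>
    ((PySem.List.enumerate kt.2 0).filter (fun ic => decide (ic.2 = "x"))).map (fun ic => ic.1))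

def pvRowCodes (result : List (List String)) (n : Int) : List Int :=
  (PySem.List.enumerate result 0).flatMap (fun kt =>
    ((PySem.List.enumerate kt.2 0).filter (fun ic => decide (ic.2 = "x"))).map
      (fun ic => ic.1 * n + kt.1))

theorem pv_mark_eq (result : List (List String)) (n : Int) :
    (PySem.List.enumerate result 0).foldl (pvB_mark n) (PySem.Set.empty, []) =
      (PySem.Set.ofList (pvRowXs result), pvRowCodes result n) := by
  have hrow : ∀ (st : PySem.Set Int × List Int) (kt : Int × List String),
      pvB_mark n st kt
        = (((PySem.List.enumerate kt.2 0).filter (fun ic => decide (ic.2 = "x"))).map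
              (fun ic => ic.1) |>.foldl PySem.Set.add st.1,
           st.2 ++ ((PySem.List.enumerate kt.2 0).filter (fun ic => decide (ic.2 = "x"))).map
              (fun ic => ic.1 * n + kt.1)) := by
    intro st kt
    unfold pvB_mark
    rw [PySem.List.foldl_prod_mk
      (f := fun b (ic : Int × String) => if ic.2 = "x" then PySem.Set.add b ic.1 else b)
      (g := fun e (ic : Int × String) => if ic.2 = "x" then e ++ [ic.1 * n + kt.1] else e)]
    congr 1
    · rw [PySem.List.foldl_ite_eq_foldl_filter (fun ic : Int × String => ic.2 = "x")
        (fun b ic => PySem.Set.add b ic.1), List.foldl_map]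
    · rw [PySem.List.foldl_append_ite (fun ic : Int × String => ic.2 = "x")
        (fun ic : Int × String => ic.1 * n + kt.1)]
  have hfold : ∀ (init : PySem.Set Int × List Int),
      (PySem.List.enumerate result 0).foldl (pvB_mark n) init
        = (PySem.List.enumerate result 0).foldl (fun st kt =>
            (((PySem.List.enumerate kt.2 0).filter (fun ic => decide (ic.2 = "x"))).map
                (fun ic => ic.1) |>.foldl PySem.Set.add st.1,
             st.2 ++ ((PySem.List.enumerate kt.2 0).filter (fun ic => decide (ic.2 = "x"))).map
                (fun ic => ic.1 * n + kt.1))) init := by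
    intro init
    apply PySem.List.foldl_congr_mem
    intro acc kt _
    exact hrow acc kt
  rw [hfold]
  rw [PySem.List.foldl_prod_mk
    (f := fun b (kt : Int × List String) =>
      (((PySem.List.enumerate kt.2 0).filter (fun ic => decide (ic.2 = "x"))).map
          (fun ic => ic.1)).foldl PySem.Set.add b)
    (g := fun e (kt : Int × List String) =>
      e ++ ((PySem.List.enumerate kt.2 0).filter (fun ic => decide (ic.2 = "x"))).map
          (fun ic => ic.1 * n + kt.1))]
  congr 1
  · rw [PySem.Set.ofList_eq_foldl, pvRowXs, ← List.foldl_flatMap]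
    rfl
  · rw [PySem.List.foldl_append_eq_flatMap
      (fun kt : Int × List String =>
        ((PySem.List.enumerate kt.2 0).filter (fun ic => decide (ic.2 = "x"))).map
          (fun ic => ic.1 * n + kt.1)), pvRowCodes, List.nil_append]

-- elements of a row's enumerate
theorem pv_mem_row (t : List String) (ic : Int × String) :
    ic ∈ (PySem.List.enumerate t 0).filter (fun ic => decide (ic.2 = "x"))
      ↔ ∃ (j : Nat) (hj : j < t.length), ic = ((j : Int), t[j]) ∧ t[j] = "x" := by
  rw [List.mem_filter, PySem.List.mem_enumerate_iff]
  constructor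
  · rintro ⟨⟨j, hj, rfl⟩, hx⟩
    simp only [decide_eq_true_eq] at hx
    exact ⟨j, hj, by simp, hx⟩
  · rintro ⟨j, hj, rfl, hx⟩
    exact ⟨⟨j, hj, by simp⟩, by simpa using hx⟩

-- membership in colf
theorem pv_mem_colf (result : List (List String)) (i k : Int) :
    k ∈ pvB_colf result i
      ↔ ∃ (m : Nat) (hm : m < result.length), k = (m : Int)
          ∧ i < ((result[m]).length : Int) ∧ PySem.List.pyGetD (result[m]) i "" = "x" := by
  unfold pvB_colf
  rw [List.mem_map]
  constructor
  · rintro ⟨kt, hkt, rfl⟩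
    rw [List.mem_filter] at hkt
    obtain ⟨hmem, hcond⟩ := hkt
    obtain ⟨m, hm, rfl⟩ := (PySem.List.mem_enumerate_iff result 0 kt).mp hmem
    simp only [Bool.and_eq_true, decide_eq_true_eq] at hcond
    exact ⟨m, hm, by simp, hcond.1, hcond.2⟩
  · rintro ⟨m, hm, rfl, hlt, hx⟩
    refine ⟨((m : Int), result[m]), ?_, rfl⟩
    rw [List.mem_filter]
    refine ⟨(PySem.List.mem_enumerate_iff result 0 _).mpr ⟨m, hm, by simp⟩, ?_⟩
    simp only [Bool.and_eq_true, decide_eq_true_eq]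
    exact ⟨hlt, hx⟩

-- x-cell ↔ colf membership, via pyGetD
theorem pv_cell_iff (result : List (List String)) (m j : Nat)
    (hm : m < result.length) (hj : j < (result[m]).length) :
    PySem.List.pyGetD (result[m]) (j : Int) "" = (result[m])[j] :=
  pv_getD_res (result[m]) "" j hj

-- ---------- efficiency: busy columns row-major = non-empty columns ----------
theorem pv_busy_mem (result : List (List String)) (i : Int) :
    i ∈ pvRowXs result
      ↔ (0 ≤ i ∧ i < (PySem.List.max? (result.map (fun t => (t.length : Int))) (fun x => x)).getD 0
          ∧ pvB_colf result i ≠ []) := by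
  set M := (PySem.List.max? (result.map (fun t => (t.length : Int))) (fun x => x)).getD 0 with hM
  unfold pvRowXs
  rw [List.mem_flatMap]
  constructor
  · rintro ⟨kt, hkt, hmem⟩
    obtain ⟨m, hm, rfl⟩ := (PySem.List.mem_enumerate_iff result 0 kt).mp hkt
    rw [List.mem_map] at hmem
    obtain ⟨ic, hic, rfl⟩ := hmem
    obtain ⟨j, hj, rfl, hx⟩ := (pv_mem_row _ ic).mp hic
    have hle := pv_len_le_max result (result[m]) (List.getElem_mem hm)
    rw [← hM] at hle
    have hj2 : j < (result[m]).length := hj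
    refine ⟨?_, ?_, ?_⟩
    · show (0 : Int) ≤ (j : Int)
      positivity
    · show ((j : Int)) < M
      omega
    · show pvB_colf result ((j : Int)) ≠ []
      have hmem2 : ((m : Int)) ∈ pvB_colf result ((j : Int)) := by
        rw [pv_mem_colf]
        exact ⟨m, hm, rfl, by exact_mod_cast hj, by rw [pv_cell_iff result m j hm hj]; exact hx⟩
      intro hnil
      rw [hnil] at hmem2
      cases hmem2
  · rintro ⟨h0, hMlt, hne⟩
    obtain ⟨k, hk⟩ := List.exists_mem_of_ne_nil _ hne
    obtain ⟨m, hm, rfl, hlt, hx⟩ := (pv_mem_colf result i k).mp hk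
    obtain ⟨j, rfl⟩ := Int.eq_ofNat_of_zero_le h0
    have hj : j < (result[m]).length := by exact_mod_cast hlt
    refine ⟨((0 : Int) + (m : Int), result[m]),
      (PySem.List.mem_enumerate_iff result 0 _).mpr ⟨m, hm, rfl⟩, ?_⟩
    rw [List.mem_map]
    refine ⟨((j : Int), (result[m])[j]), (pv_mem_row _ _).mpr ⟨j, hj, rfl, ?_⟩, rfl⟩
    rw [← pv_cell_iff result m j hm hj]
    exact hx

theorem pv_pyRange_nodup (a b : Int) : (PySem.List.pyRange a b 1).Nodup := by
  rw [PySem.List.pyRange_one]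
  exact List.nodup_range.map (fun x y h => by omega)

theorem pv_pyRange_pairwise (a b : Int) :
    (PySem.List.pyRange a b 1).Pairwise (· < ·) := by
  rw [PySem.List.pyRange_one]
  rw [List.pairwise_map]
  exact List.pairwise_lt_range.imp (fun h => by omega)

theorem pv_busy_len (result : List (List String)) :
    (PySem.Set.len (PySem.Set.ofList (pvRowXs result)))
      = (PySem.List.max? (result.map (fun t => (t.length : Int))) (fun x => x)).getD 0
        - ((((PySem.List.pyRange 0 ((PySem.List.max? (result.map (fun t => (t.length : Int))) (fun x => x)).getD 0) 1).map
            (pvB_colf result)).countP (fun c => c.isEmpty) : Nat) : Int) := by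
  set M := (PySem.List.max? (result.map (fun t => (t.length : Int))) (fun x => x)).getD 0 with hMdef
  have hM0 : 0 ≤ M := pv_max_nonneg result
  have hperm : (PySem.Set.ofList (pvRowXs result)).Perm
      ((PySem.List.pyRange 0 M 1).filter (fun i => !(pvB_colf result i).isEmpty)) := by
    rw [List.perm_ext_iff_of_nodup (PySem.Set.nodup_ofList _)
      ((pv_pyRange_nodup 0 M).filter _)]
    intro i
    rw [PySem.Set.mem_ofList, pv_busy_mem, List.mem_filter, PySem.List.mem_pyRange_one,
      ← hMdef]
    simp only [Bool.not_eq_eq_eq_not, Bool.not_true, List.isEmpty_eq_false_iff]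
    tauto
  have hlen := hperm.length_eq
  rw [PySem.Set.len, hlen]
  have hcount : ((PySem.List.pyRange 0 M 1).filter (fun i => !(pvB_colf result i).isEmpty)).length
      = (PySem.List.pyRange 0 M 1).countP (fun i => !(pvB_colf result i).isEmpty) :=
    (List.countP_eq_length_filter ..).symm
  have hsplit : (PySem.List.pyRange 0 M 1).countP (fun i => (pvB_colf result i).isEmpty)
      + (PySem.List.pyRange 0 M 1).countP (fun i => !(pvB_colf result i).isEmpty)
      = (PySem.List.pyRange 0 M 1).length := by
    have h := pv_count_split (PySem.List.pyRange 0 M 1) (fun _ => true)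
      (fun i => (pvB_colf result i).isEmpty)
    simpa [List.countP_true] using h.symm
  have hrlen : ((PySem.List.pyRange 0 M 1).length : Int) = M := by
    rw [PySem.List.pyRange_one]
    simp
    omega
  have hmapc : (((PySem.List.pyRange 0 M 1).map (pvB_colf result)).countP (fun c => c.isEmpty))
      = (PySem.List.pyRange 0 M 1).countP (fun i => (pvB_colf result i).isEmpty) := by
    rw [List.countP_map]
    rfl
  rw [hcount, hmapc]
  omega

-- ---------- task switches: sorted events = column-major codes ----------
def pvColCodes (result : List (List String)) (n : Int) : List Int :=
  (PySem.List.pyRange 0 ((PySem.List.max? (result.map (fun t => (t.length : Int))) (fun x => x)).getD 0) 1).flatMap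
    (fun i => (pvB_colf result i).map (fun k => i * n + k))

theorem pv_colf_bounds (result : List (List String)) (i k : Int) (hk : k ∈ pvB_colf result i) :
    0 ≤ k ∧ k < (result.length : Int) := by
  obtain ⟨m, hm, rfl, _, _⟩ := (pv_mem_colf result i k).mp hk
  constructor
  · positivity
  · exact_mod_cast hm

theorem pv_code_lt (n i j k k' : Int) (hik : 0 ≤ k) (hkn : k < n) (h0k' : 0 ≤ k')
    (hij : i < j) : i * n + k < j * n + k' := by
  have h1 : (i + 1) * n ≤ j * n := by
    apply mul_le_mul_of_nonneg_right (by omega) (by omega)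
  nlinarith

-- the column-major code list is strictly increasing
theorem pv_colCodes_pairwise (result : List (List String)) :
    (pvColCodes result (result.length : Int)).Pairwise (· < ·) := by
  unfold pvColCodes
  rw [List.flatMap_def, List.pairwise_flatten]
  constructor
  · intro l hl
    rw [List.mem_map] at hl
    obtain ⟨i, _, rfl⟩ := hl
    rw [List.pairwise_map]
    have hcolp : (pvB_colf result i).Pairwise (· < ·) := by
      unfold pvB_colf
      rw [List.pairwise_map]
      exact ((PySem.List.pairwise_lt_enumerate result 0).filter _).imp (fun h => h)
    exact hcolp.imp (fun h => by omega)
  · rw [List.pairwise_map]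
    refine (pv_pyRange_pairwise 0 _).imp_of_mem (fun {i j} hi hj hij => ?_)
    intro x hx y hy
    rw [List.mem_map] at hx hy
    obtain ⟨k, hk, rfl⟩ := hx
    obtain ⟨k', hk', rfl⟩ := hy
    obtain ⟨hk0, hkn⟩ := pv_colf_bounds result i k hk
    obtain ⟨hk'0, _⟩ := pv_colf_bounds result j k' hk'
    exact pv_code_lt _ i j k k' hk0 hkn hk'0 hij

-- decoding a code: (j*n + k) mod n = k
theorem pv_code_mod (n j k : Int) (h0 : 0 ≤ k) (hk : k < n) :
    PySem.Int.mod (j * n + k) n = k := by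
  rw [PySem.Int.mod_eq_emod_of_pos (by omega)]
  have h1 : j * n + k = k + n * j := by ring
  rw [h1, Int.add_mul_emod_self_left, Int.emod_eq_of_lt h0 hk]

-- the row-major code list has no duplicates
theorem pv_rowCodes_nodup (result : List (List String)) :
    (pvRowCodes result (result.length : Int)).Nodup := by
  unfold pvRowCodes
  rw [List.nodup_flatMap]
  constructor
  · intro kt hkt
    have hn1 : (1 : Int) ≤ (result.length : Int) := by
      obtain ⟨m, hm, _⟩ := (PySem.List.mem_enumerate_iff result 0 kt).mp hkt
      omega
    have hp : (((PySem.List.enumerate kt.2 0).filter (fun ic => decide (ic.2 = "x"))).map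
        (fun ic => ic.1 * (result.length : Int) + kt.1)).Pairwise (· < ·) := by
      rw [List.pairwise_map]
      refine ((PySem.List.pairwise_lt_enumerate kt.2 0).filter _).imp (fun h => ?_)
      nlinarith
    exact hp.imp (fun h => ne_of_lt h)
  · refine (PySem.List.pairwise_lt_enumerate result 0).imp_of_mem
      (fun {kt kt'} hmem hmem' hlt => ?_)
    intro a ha ha'
    obtain ⟨m, hm, rfl⟩ := (PySem.List.mem_enumerate_iff result 0 kt).mp hmem
    obtain ⟨m', hm', rfl⟩ := (PySem.List.mem_enumerate_iff result 0 kt').mp hmem'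
    rw [List.mem_map] at ha ha'
    obtain ⟨ic, _, rfl⟩ := ha
    obtain ⟨ic', _, heq⟩ := ha'
    have h1 : PySem.Int.mod (ic.1 * (result.length : Int) + (0 + (m : Int))) (result.length : Int)
        = 0 + (m : Int) := pv_code_mod _ _ _ (by omega) (by omega)
    have h2 : PySem.Int.mod (ic'.1 * (result.length : Int) + (0 + (m' : Int))) (result.length : Int)
        = 0 + (m' : Int) := pv_code_mod _ _ _ (by omega) (by omega)
    rw [heq] at h2
    rw [h1] at h2
    simp only at hlt
    omega

-- membership correspondence-- membership correspondence between row-major and column-major codes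
theorem pv_codes_mem (result : List (List String)) (e : Int) :
    e ∈ pvRowCodes result (result.length : Int)
      ↔ e ∈ pvColCodes result (result.length : Int) := by
  unfold pvRowCodes pvColCodes
  rw [List.mem_flatMap, List.mem_flatMap]
  constructor
  · rintro ⟨kt, hkt, hmem⟩
    obtain ⟨m, hm, rfl⟩ := (PySem.List.mem_enumerate_iff result 0 kt).mp hkt
    rw [List.mem_map] at hmem
    obtain ⟨ic, hic, rfl⟩ := hmem
    obtain ⟨j, hj, rfl, hx⟩ := (pv_mem_row _ ic).mp hic
    have hle := pv_len_le_max result (result[m]) (List.getElem_mem hm)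
    have hj2 : j < (result[m]).length := hj
    refine ⟨(j : Int), ?_, ?_⟩
    · rw [PySem.List.mem_pyRange_one]
      constructor
      · positivity
      · omega
    · rw [List.mem_map]
      refine ⟨(m : Int), (pv_mem_colf result ((j : Int)) ((m : Int))).mpr
        ⟨m, hm, rfl, by exact_mod_cast hj, by rw [pv_cell_iff result m j hm hj]; exact hx⟩, ?_⟩
      simp
  · rintro ⟨i, hi, hmem⟩
    rw [List.mem_map] at hmem
    obtain ⟨k, hk, rfl⟩ := hmem
    obtain ⟨m, hm, rfl, hlt, hx⟩ := (pv_mem_colf result i k).mp hk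
    rw [PySem.List.mem_pyRange_one] at hi
    obtain ⟨j, rfl⟩ := Int.eq_ofNat_of_zero_le hi.1
    have hj : j < (result[m]).length := by exact_mod_cast hlt
    refine ⟨((0 : Int) + (m : Int), result[m]),
      (PySem.List.mem_enumerate_iff result 0 _).mpr ⟨m, hm, rfl⟩, ?_⟩
    rw [List.mem_map]
    refine ⟨((j : Int), (result[m])[j]), (pv_mem_row _ _).mpr ⟨j, hj, rfl, ?_⟩, by simp⟩
    rw [← pv_cell_iff result m j hm hj]
    exact hx

theorem pv_sorted_codes (result : List (List String)) :
    PySem.List.sorted (pvRowCodes result (result.length : Int)) (fun x => x)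
      = pvColCodes result (result.length : Int) := by
  apply PySem.List.sorted_eq_of_perm_of_pairwise_lt
  · rw [List.perm_ext_iff_of_nodup
      ((pv_colCodes_pairwise result).imp (fun h => ne_of_lt h))
      (pv_rowCodes_nodup result)]
    intro e
    exact (pv_codes_mem result e).symm
  · exact pv_colCodes_pairwise result

-- the decoded fold over column-major codes is A's nested column fold
theorem pv_sw_fold (result : List (List String)) (p0 : Int × Int) :
    (pvColCodes result (result.length : Int)).foldl
      (fun (p : Int × Int) e =>
        let k := PySem.Int.mod e (result.length : Int)
        if k ≠ p.2 then (p.1 + 1, k) else p) p0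
    = (((PySem.List.pyRange 0 ((PySem.List.max? (result.map (fun t => (t.length : Int))) (fun x => x)).getD 0) 1).map
        (pvB_colf result)).foldl (fun (p : Int × Int) c => c.foldl pvB_swStep p) p0) := by
  unfold pvColCodes
  rw [List.foldl_flatMap, List.foldl_map]
  apply PySem.List.foldl_congr_mem
  intro acc i _
  rw [List.foldl_map]
  apply PySem.List.foldl_congr_mem
  intro p k hk
  obtain ⟨hk0, hkn⟩ := pv_colf_bounds result i k hk
  simp only [pv_code_mod (result.length : Int) i k hk0 hkn]
  rfl

-- ===== VERDICT (by name: the statement is the Claim_ definition above) =====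
theorem calculate_stats_spec : Claim_equal_calculate_stats := by
  intro result _ hPre
  unfold Spec_calculate_stats calculate_stats calculate_stats_alt
  simp only [List.nil_append, List.cons_append]
  rw [pv_max_eq result, pv_wait_eq result, pv_seed_eq result, pv_mark_eq result]
  rw [pv_foldl_append_join result (fun t => PySem.Int.toStr (t.length : Int) ++ " + ") "("]
  rw [pv_foldl_append_join
    (result.foldl pvB_threadWait (0, 0, ([] : List Int))).2.2
    (fun x => PySem.Int.toStr x ++ " + ") "("]
  rw [List.map_map, show ((fun x => PySem.Int.toStr x ++ " + ") ∘ fun (t : List String) =>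
      ((t.length : Int))) = (fun (t : List String) => PySem.Int.toStr ((t.length : Int)) ++ " + ")
    from rfl]
  set M := (PySem.List.max? (result.map (fun t => (t.length : Int))) (fun x => x)).getD 0 with hM
  rw [pv_eff_loop result M ((M - 0).toNat) 0 rfl (result.map (fun _ => false)) 0
    (by simp) (pv_hfin_zero result hPre)]
  rw [pv_sw_loop result M ((M - 0).toNat) 0 rfl (result.map (fun _ => false)) 0 _
    (by simp) (pv_hfin_zero result hPre)]
  rw [pv_sorted_codes result, pv_sw_fold result]
  rw [show (0 : Int) + ((((PySem.List.pyRange 0 M 1).map (pvB_colf result)).countP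
      (fun c => c.isEmpty) : Nat) : Int) = ((((PySem.List.pyRange 0 M 1).map (pvB_colf result)).countP
      (fun c => c.isEmpty) : Nat) : Int) from by ring]
  rw [show M - ((((PySem.List.pyRange 0 M 1).map (pvB_colf result)).countP
      (fun c => c.isEmpty) : Nat) : Int) = PySem.Set.len (PySem.Set.ofList (pvRowXs result)) from
    (pv_busy_len result).symm]
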